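-- pv_equiv track=rewrite | github.com/nikfuzz/DataStructures_Algorithms | bitwise/Interesting_Array.py | solve
-- ===== SOURCE A (Python) =====
-- def solve(a):
--     count_odd = 0
--     for i in range(len(a)):
--         if a[i] & 1 == 1:
--             count_odd += 1
--
--     if count_odd & 1 == 0:
--         return "Yes"
--     return "No"
-- ===== SOURCE B (Python) =====
-- def solve(a):
--     return "Yes" if sum(a) & 1 == 0 else "No"
-- ===== Notes on version B (the rewrite author's own statement) =====
-- stated objective: simpler
-- what changed: Replaces the index loop with per-element odd test and counter by a single sum(a) whose low bit is checked: the parity of the count of odd elements equals the parity of the total sum.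
import Mathlib
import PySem

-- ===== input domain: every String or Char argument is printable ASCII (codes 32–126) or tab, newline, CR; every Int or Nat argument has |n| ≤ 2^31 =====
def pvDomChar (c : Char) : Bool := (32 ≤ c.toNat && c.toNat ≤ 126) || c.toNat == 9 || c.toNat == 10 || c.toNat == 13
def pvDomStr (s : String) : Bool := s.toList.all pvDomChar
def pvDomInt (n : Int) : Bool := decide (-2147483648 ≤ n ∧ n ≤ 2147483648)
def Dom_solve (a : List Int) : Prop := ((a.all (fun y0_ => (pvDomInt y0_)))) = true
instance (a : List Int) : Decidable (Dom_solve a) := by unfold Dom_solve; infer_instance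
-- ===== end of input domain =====

-- B replaces the odd-element counter with one sum of the whole list (equal parity); objective: simpler.

-- ===== PORT A =====
def solve (a : List Int) : String :=
  let countOdd : Int :=
    (PySem.List.pyRange 0 (a.length : Int) 1).foldl
      (fun c i => if PySem.Int.band (PySem.List.pyGetD a i 0) 1 == 1 then c + 1 else c) 0
  if PySem.Int.band countOdd 1 == 0 then "Yes" else "No"

-- ===== PORT B =====
def solve_alt (a : List Int) : String :=
  if PySem.Int.band (a.foldl (· + ·) 0) 1 == 0 then "Yes" else "No"

-- ===== PRECONDITION & SPEC =====
def Spec_solve (a : List Int) (out : String) : Prop := out = solve_alt a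
instance (a : List Int) (out : String) : Decidable (Spec_solve a out) := by unfold Spec_solve; infer_instance

-- ===== CLAIM (what is proved, stated in full; the proofs are below) =====
def Claim_equal_solve : Prop := ∀ (a : List Int), Dom_solve a → Spec_solve a (solve a)

-- ===== LEMMAS AND PROOFS =====

lemma parity_invariant (a : List Int) : ∀ (c s : Int),
    PySem.Int.mod c 2 = PySem.Int.mod s 2 →
    PySem.Int.mod (a.foldl (fun c v => if PySem.Int.band v 1 == 1 then c + 1 else c) c) 2
      = PySem.Int.mod (a.foldl (· + ·) s) 2 := by
  induction a with
  | nil => intro c s h; simpa using h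
  | cons v t ih =>
    intro c s h
    simp only [List.foldl_cons]
    apply ih
    simp only [PySem.Int.band_one, PySem.Int.mod_eq_emod_of_pos (by norm_num : (0:Int) < 2),
      beq_iff_eq] at h ⊢
    split_ifs with hv <;> omega

theorem solve_spec : Claim_equal_solve := by
  intro a _
  unfold Spec_solve solve solve_alt
  have hfold : ((PySem.List.pyRange 0 (a.length : Int) 1).foldl
      (fun c i => if PySem.Int.band (PySem.List.pyGetD a i 0) 1 == 1 then c + 1 else c) (0:Int))
      = a.foldl (fun c v => if PySem.Int.band v 1 == 1 then c + 1 else c) 0 := by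
    simpa using PySem.List.foldl_pyRange_pyGetD' (xs := a) (d := 0)
      (f := fun c v => if PySem.Int.band v 1 == 1 then c + 1 else c) (init := 0) (a := 0) le_rfl
  have h := parity_invariant a 0 0 rfl
  simp only [hfold]
  rw [PySem.Int.band_one, PySem.Int.band_one, h]
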